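-- pv_equiv track=rewrite | github.com/brendanbikes/adventOfCode2023 | day14/day14Code.py | rotate_cw
-- ===== SOURCE A (Python) =====
-- def rotate_cw(indices: [], is_barriers: bool, size: int):
--     # rotate clockwise 90 degrees
--     new_indices = []
--     for j in range(size):
--         new_row = []
--         for i, row in enumerate(indices[::-1]):
--             if j in row:
--                 new_row.append(i)
--         if is_barriers:
--             new_row = [-1] + new_row + [size]
--         new_indices.append(new_row)
--
--     return new_indices
-- ===== SOURCE B (Python) =====
-- def rotate_cw(indices: [], is_barriers: bool, size: int):
--     # single-pass scatter: bucket each reversed-row index under the values it contains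
--     buckets = [[] for _ in range(size)]
--     for i, row in enumerate(reversed(indices)):
--         for v in dict.fromkeys(row):
--             if 0 <= v < size:
--                 buckets[v].append(i)
--     if is_barriers:
--         return [[-1] + b + [size] for b in buckets]
--     return buckets
-- ===== Notes on version B (the rewrite author's own statement) =====
-- stated objective: faster
-- what changed: replaces the per-column rescan of all rows (with indices[::-1] rebuilt each iteration) by one pass over the reversed rows that scatters each row index into a bucket per contained value
import Mathlib
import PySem

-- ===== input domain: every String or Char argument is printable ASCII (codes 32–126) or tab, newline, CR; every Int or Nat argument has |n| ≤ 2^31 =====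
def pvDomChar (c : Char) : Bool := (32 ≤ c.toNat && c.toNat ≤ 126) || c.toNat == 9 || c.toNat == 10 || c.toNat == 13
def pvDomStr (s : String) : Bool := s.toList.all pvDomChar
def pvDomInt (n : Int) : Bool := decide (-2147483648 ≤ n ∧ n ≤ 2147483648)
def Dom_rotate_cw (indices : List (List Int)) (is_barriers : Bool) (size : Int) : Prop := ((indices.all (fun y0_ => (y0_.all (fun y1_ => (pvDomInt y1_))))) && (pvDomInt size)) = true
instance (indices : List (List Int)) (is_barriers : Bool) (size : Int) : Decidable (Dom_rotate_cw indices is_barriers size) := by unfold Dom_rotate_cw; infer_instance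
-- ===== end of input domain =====

-- B replaces A's per-column rescan of all rows by a single scatter pass into buckets (faster, asymptotic).

-- ===== PORT A =====
def rotate_cw (indices : List (List Int)) (is_barriers : Bool) (size : Int) : List (List Int) :=
  (PySem.List.pyRange 0 size 1).foldl (fun new_indices j =>
    let new_row := (PySem.List.enumerate ((PySem.List.slice? indices none none (-1)).getD []) 0).foldl
      (fun nr p => if j ∈ p.2 then nr ++ [p.1] else nr) []
    let new_row := if is_barriers then [-1] ++ new_row ++ [size] else new_row
    new_indices ++ [new_row]) []

-- ===== PORT B =====
def rotate_cw_alt (indices : List (List Int)) (is_barriers : Bool) (size : Int) : List (List Int) :=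
  let buckets0 := (PySem.List.pyRange 0 size 1).map (fun _ => ([] : List Int))
  let buckets := (PySem.List.enumerate indices.reverse 0).foldl
    (fun bs p => (PySem.List.dedup p.2).foldl
      (fun bs v => if 0 ≤ v ∧ v < size then PySem.List.pySetD bs v ((PySem.List.pyGetD bs v []) ++ [p.1]) else bs) bs)
    buckets0
  if is_barriers then buckets.map (fun b => [-1] ++ b ++ [size]) else buckets

-- ===== PRECONDITION & SPEC =====
def Spec_rotate_cw (indices : List (List Int)) (is_barriers : Bool) (size : Int) (out : List (List Int)) : Prop := out = rotate_cw_alt indices is_barriers size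
instance (indices : List (List Int)) (is_barriers : Bool) (size : Int) (out : List (List Int)) : Decidable (Spec_rotate_cw indices is_barriers size out) := by unfold Spec_rotate_cw; infer_instance

-- ===== CLAIM (what is proved, stated in full; the proofs are below) =====
def Claim_equal_rotate_cw : Prop := ∀ (indices : List (List Int)) (is_barriers : Bool) (size : Int), Dom_rotate_cw indices is_barriers size → Spec_rotate_cw indices is_barriers size (rotate_cw indices is_barriers size)

-- ===== LEMMAS AND PROOFS =====

-- the inner update of B's scatter pass, named for the proofs
def pvInner (size i : Int) : List (List Int) → Int → List (List Int) :=
  fun bs v => if 0 ≤ v ∧ v < size then PySem.List.pySetD bs v ((PySem.List.pyGetD bs v []) ++ [i]) else bs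

theorem pvInner_length (size i : Int) (vs : List Int) (bs : List (List Int)) :
    (vs.foldl (pvInner size i) bs).length = bs.length := by
  induction vs generalizing bs with
  | nil => rfl
  | cons v vs ih =>
    simp only [List.foldl_cons]
    rw [ih]
    unfold pvInner
    split_ifs with h
    · rcases h with ⟨h0, _⟩
      rw [PySem.List.pySetD_of_nonneg _ _ h0, List.length_set]
    · rfl

theorem pvInner_getElem (size i : Int) (vs : List Int) (hnd : vs.Nodup)
    (bs : List (List Int)) (k : Nat) (hk : k < bs.length) (hks : (k : Int) < size) :
    (vs.foldl (pvInner size i) bs)[k]? =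
      some (bs[k] ++ (if (k : Int) ∈ vs then [i] else [])) := by
  induction vs generalizing bs with
  | nil => simp
  | cons v vs ih =>
    rcases List.nodup_cons.mp hnd with ⟨hv, hnd'⟩
    simp only [List.foldl_cons]
    by_cases hvk : v = (k : Int)
    · subst hvk
      have hcond : (0 : Int) ≤ (k : Int) ∧ (k : Int) < size := ⟨Int.natCast_nonneg k, hks⟩
      have hstep : pvInner size i bs (k : Int) = bs.set k (bs[k] ++ [i]) := by
        unfold pvInner
        rw [if_pos hcond, PySem.List.pySetD_of_nonneg _ _ hcond.1,
          PySem.List.pyGetD_eq_getElem _ _ hcond.1 (by simpa using hk)]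
        simp
      rw [hstep, ih hnd' _ (by simpa using hk)]
      have : ((k : Int) ∈ vs) = False := by simp [hv]
      simp [this, List.getElem_set_self (h := by simpa using hk)]
    · have hstep : (pvInner size i bs v)[k]? = bs[k]? ∧ (pvInner size i bs v).length = bs.length := by
        unfold pvInner
        split_ifs with h
        · rcases h with ⟨h0, _⟩
          rw [PySem.List.pySetD_of_nonneg _ _ h0]
          constructor
          · rw [List.getElem?_set_ne]
            intro hc
            apply hvk
            omega
          · simp
        · exact ⟨rfl, rfl⟩
      rw [ih hnd' _ (by omega)]
      have hbk : (pvInner size i bs v)[k] = bs[k] := by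
        have h1 := hstep.1
        rw [List.getElem?_eq_getElem (by omega), List.getElem?_eq_getElem hk] at h1
        exact Option.some.inj h1
      rw [hbk]
      by_cases h2 : (k : Int) ∈ vs
      · rw [if_pos h2, if_pos (List.mem_cons_of_mem _ h2)]
      · rw [if_neg h2, if_neg (by
          simp only [List.mem_cons]
          rintro (hc | hc)
          · exact hvk hc.symm
          · exact h2 hc)]

theorem pvScatter_length (size : Int) (ps : List (Int × List Int)) (bs : List (List Int)) :
    (ps.foldl (fun bs p => (PySem.List.dedup p.2).foldl (pvInner size p.1) bs) bs).length = bs.length := by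
  induction ps generalizing bs with
  | nil => rfl
  | cons p ps ih => simp only [List.foldl_cons]; rw [ih, pvInner_length]

theorem pvScatter_getElem (size : Int) (ps : List (Int × List Int))
    (bs : List (List Int)) (k : Nat) (hk : k < bs.length) (hks : (k : Int) < size) :
    (ps.foldl (fun bs p => (PySem.List.dedup p.2).foldl (pvInner size p.1) bs) bs)[k]? =
      some (bs[k] ++ ((ps.filter (fun p => (k : Int) ∈ p.2)).map (·.1))) := by
  induction ps generalizing bs with
  | nil => simp
  | cons p ps ih =>
    simp only [List.foldl_cons]
    have hlen : ((PySem.List.dedup p.2).foldl (pvInner size p.1) bs).length = bs.length :=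
      pvInner_length _ _ _ _
    rw [ih _ (by omega)]
    have h1 := pvInner_getElem size p.1 (PySem.List.dedup p.2) (PySem.List.nodup_dedup _) bs k hk hks
    rw [List.getElem?_eq_getElem (by omega)] at h1
    have hbk := Option.some.inj h1
    rw [hbk]
    by_cases hm : (k : Int) ∈ p.2
    · simp [hm]
    · simp [hm]

theorem pvGather (j : Int) (ps : List (Int × List Int)) (acc : List Int) :
    ps.foldl (fun nr p => if j ∈ p.2 then nr ++ [p.1] else nr) acc =
      acc ++ (ps.filter (fun p => j ∈ p.2)).map (·.1) := by
  induction ps generalizing acc with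
  | nil => simp
  | cons p ps ih =>
    simp only [List.foldl_cons, List.filter_cons]
    by_cases h : j ∈ p.2 <;> simp [h, ih, List.append_assoc]

theorem rotate_cw_spec : Claim_equal_rotate_cw := by
  intro indices is_barriers size _
  unfold Spec_rotate_cw
  have hscat : ∀ k : Nat, k < size.toNat →
      ((PySem.List.enumerate indices.reverse 0).foldl
        (fun bs p => (PySem.List.dedup p.2).foldl (pvInner size p.1) bs)
        ((PySem.List.pyRange 0 size 1).map (fun _ => ([] : List Int))))[k]? =
      some (((PySem.List.enumerate indices.reverse 0).filter (fun p => (k : Int) ∈ p.2)).map (·.1)) := by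
    intro k hk
    have hlen : ((PySem.List.pyRange 0 size 1).map (fun _ => ([] : List Int))).length = size.toNat := by
      simp [PySem.List.length_pyRange_one]
    have h := pvScatter_getElem size (PySem.List.enumerate indices.reverse 0)
      ((PySem.List.pyRange 0 size 1).map (fun _ => ([] : List Int))) k (by omega) (by omega)
    rw [h]
    congr 1
    simp
  have hlenB :
      ((PySem.List.enumerate indices.reverse 0).foldl
        (fun bs p => (PySem.List.dedup p.2).foldl (pvInner size p.1) bs)
        ((PySem.List.pyRange 0 size 1).map (fun _ => ([] : List Int)))).length = size.toNat := by
    rw [pvScatter_length]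
    simp [PySem.List.length_pyRange_one]
  unfold rotate_cw rotate_cw_alt
  simp only [PySem.List.slice?_none_none_neg_one, Option.getD_some, pvGather, List.nil_append,
    PySem.List.foldl_append_singleton_eq_map]
  cases is_barriers with
  | false =>
    simp only [Bool.false_eq_true, if_false]
    apply List.ext_getElem?
    intro k
    by_cases hk : k < size.toNat
    · rw [List.getElem?_map, PySem.List.getElem?_pyRange_one]
      have h := hscat k hk
      rw [show (List.foldl (fun bs p => (PySem.List.dedup p.2).foldl (pvInner size p.1) bs)
        ((PySem.List.pyRange 0 size 1).map (fun _ => ([] : List Int)))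
        (PySem.List.enumerate indices.reverse 0)) =
        (List.foldl (fun bs p => List.foldl
          (fun bs v => if 0 ≤ v ∧ v < size then PySem.List.pySetD bs v ((PySem.List.pyGetD bs v []) ++ [p.1]) else bs)
          bs (PySem.List.dedup p.2))
        ((PySem.List.pyRange 0 size 1).map (fun _ => ([] : List Int)))
        (PySem.List.enumerate indices.reverse 0)) from rfl] at h
      rw [h]
      simp [hk]
    · have h1 : ((PySem.List.pyRange 0 size 1).length ≤ k) := by
        rw [PySem.List.length_pyRange_one]; omega
      have h2 : (List.foldl (fun bs p => List.foldl
          (fun bs v => if 0 ≤ v ∧ v < size then PySem.List.pySetD bs v ((PySem.List.pyGetD bs v []) ++ [p.1]) else bs)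
          bs (PySem.List.dedup p.2))
        ((PySem.List.pyRange 0 size 1).map (fun _ => ([] : List Int)))
        (PySem.List.enumerate indices.reverse 0)).length = size.toNat := hlenB
      rw [List.getElem?_eq_none (by simpa using h1),
          List.getElem?_eq_none (show (List.foldl (fun bs p => List.foldl
          (fun bs v => if 0 ≤ v ∧ v < size then PySem.List.pySetD bs v ((PySem.List.pyGetD bs v []) ++ [p.1]) else bs)
          bs (PySem.List.dedup p.2))
        ((PySem.List.pyRange 0 size 1).map (fun _ => ([] : List Int)))
        (PySem.List.enumerate indices.reverse 0)).length ≤ k by rw [h2]; omega)]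
  | true =>
    simp only [if_true]
    apply List.ext_getElem?
    intro k
    by_cases hk : k < size.toNat
    · rw [List.getElem?_map, PySem.List.getElem?_pyRange_one, List.getElem?_map]
      have h := hscat k hk
      rw [show (List.foldl (fun bs p => (PySem.List.dedup p.2).foldl (pvInner size p.1) bs)
        ((PySem.List.pyRange 0 size 1).map (fun _ => ([] : List Int)))
        (PySem.List.enumerate indices.reverse 0)) =
        (List.foldl (fun bs p => List.foldl
          (fun bs v => if 0 ≤ v ∧ v < size then PySem.List.pySetD bs v ((PySem.List.pyGetD bs v []) ++ [p.1]) else bs)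
          bs (PySem.List.dedup p.2))
        ((PySem.List.pyRange 0 size 1).map (fun _ => ([] : List Int)))
        (PySem.List.enumerate indices.reverse 0)) from rfl] at h
      rw [h]
      simp [hk]
    · have h1 : ((PySem.List.pyRange 0 size 1).length ≤ k) := by
        rw [PySem.List.length_pyRange_one]; omega
      have h2 : (List.foldl (fun bs p => List.foldl
          (fun bs v => if 0 ≤ v ∧ v < size then PySem.List.pySetD bs v ((PySem.List.pyGetD bs v []) ++ [p.1]) else bs)
          bs (PySem.List.dedup p.2))
        ((PySem.List.pyRange 0 size 1).map (fun _ => ([] : List Int)))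
        (PySem.List.enumerate indices.reverse 0)).length = size.toNat := hlenB
      rw [List.getElem?_eq_none (by simpa using h1),
          List.getElem?_eq_none (show ((List.foldl (fun bs p => List.foldl
          (fun bs v => if 0 ≤ v ∧ v < size then PySem.List.pySetD bs v ((PySem.List.pyGetD bs v []) ++ [p.1]) else bs)
          bs (PySem.List.dedup p.2))
        ((PySem.List.pyRange 0 size 1).map (fun _ => ([] : List Int)))
        (PySem.List.enumerate indices.reverse 0)).map (fun b => [-1] ++ b ++ [size])).length ≤ k by
            rw [List.length_map, h2]; omega)]
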